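-- pv_equiv track=rewrite | github.com/abhishek1349/fintracker | gamification.py | get_achievement
-- ===== SOURCE A (Python) =====
-- def get_achievement(points):
--     """
--     Return an achievement based on points
--     """
--     achievements = {
--         100: "Financial Novice: Started your financial journey!",
--         200: "Budget Master: Created your first budget plan!",
--         300: "Expense Tracker: Consistently tracking your spending!",
--         500: "Savings Hero: Building your financial cushion!",
--         750: "Investment Beginner: Made your first investment plan!",
--         1000: "Financial Wizard: Managing your money like a pro!",
--         1500: "Money Guru: Teaching others about financial wisdom!",
--         2000: "Wealth Architect: Building a solid financial future!",
--         3000: "Financial Freedom Fighter: On your way to independence!",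
--         5000: "FinSmart Legend: Achieved legendary financial status!"
--     }
--
--     # Find the highest achievement unlocked
--     unlocked_achievement = None
--     for threshold, achievement in sorted(achievements.items()):
--         if points >= threshold:
--             unlocked_achievement = achievement
--
--     return unlocked_achievement
-- ===== SOURCE B (Python) =====
-- def get_achievement(points):
--     """
--     Return an achievement based on points
--     """
--     # Tiers listed from highest to lowest; recursive first-match with early
--     # return replaces A's ascending scan-and-overwrite over a sorted dict.
--     tiers = [
--         (5000, "FinSmart Legend: Achieved legendary financial status!"),
--         (3000, "Financial Freedom Fighter: On your way to independence!"),
--         (2000, "Wealth Architect: Building a solid financial future!"),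
--         (1500, "Money Guru: Teaching others about financial wisdom!"),
--         (1000, "Financial Wizard: Managing your money like a pro!"),
--         (750, "Investment Beginner: Made your first investment plan!"),
--         (500, "Savings Hero: Building your financial cushion!"),
--         (300, "Expense Tracker: Consistently tracking your spending!"),
--         (200, "Budget Master: Created your first budget plan!"),
--         (100, "Financial Novice: Started your financial journey!"),
--     ]
--
--     def pick(remaining):
--         if not remaining:
--             return None
--         threshold, text = remaining[0]
--         if points >= threshold:
--             return text
--         return pick(remaining[1:])
--
--     return pick(tiers)
-- ===== Notes on version B (the rewrite author's own statement) =====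
-- stated objective: alternative
-- what changed: Replaces A's ascending scan-and-overwrite over the sorted dict items with a recursive first-match descent over a descending tier list that returns as soon as a threshold is met.
import Mathlib
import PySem

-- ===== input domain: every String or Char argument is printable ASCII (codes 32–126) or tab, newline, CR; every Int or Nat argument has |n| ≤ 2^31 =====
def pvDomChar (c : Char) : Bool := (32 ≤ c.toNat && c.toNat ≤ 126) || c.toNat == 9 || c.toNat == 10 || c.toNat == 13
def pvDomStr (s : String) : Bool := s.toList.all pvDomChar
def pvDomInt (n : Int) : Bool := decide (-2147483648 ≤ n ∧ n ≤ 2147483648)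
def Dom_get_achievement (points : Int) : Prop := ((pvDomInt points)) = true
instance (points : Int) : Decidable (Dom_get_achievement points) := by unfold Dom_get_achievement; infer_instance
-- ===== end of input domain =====

-- B replaces A's ascending scan-and-overwrite over sorted dict items with a
-- recursive first-match descent over a descending tier list (objective: alternative).

-- ===== PORT A =====
-- A's dict literal (insertion order = ascending keys)
def pvAchievements : PySem.Dict Int String := PySem.Dict.ofList
  [((100 : Int), "Financial Novice: Started your financial journey!"),
   ((200 : Int), "Budget Master: Created your first budget plan!"),
   ((300 : Int), "Expense Tracker: Consistently tracking your spending!"),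
   ((500 : Int), "Savings Hero: Building your financial cushion!"),
   ((750 : Int), "Investment Beginner: Made your first investment plan!"),
   ((1000 : Int), "Financial Wizard: Managing your money like a pro!"),
   ((1500 : Int), "Money Guru: Teaching others about financial wisdom!"),
   ((2000 : Int), "Wealth Architect: Building a solid financial future!"),
   ((3000 : Int), "Financial Freedom Fighter: On your way to independence!"),
   ((5000 : Int), "FinSmart Legend: Achieved legendary financial status!")]

def get_achievement (points : Int) : Option String :=
  -- for threshold, achievement in sorted(achievements.items()): keys are distinct,
  -- so Python's lexicographic pair sort equals sorting by the first component
  (PySem.List.sorted pvAchievements.items Prod.fst).foldl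
    (fun unlocked_achievement ta =>
      if points ≥ ta.1 then some ta.2 else unlocked_achievement) none

-- ===== PORT B =====
-- B's tier list, highest threshold first
def pvTiersDesc : List (Int × String) :=
  [((5000 : Int), "FinSmart Legend: Achieved legendary financial status!"),
   ((3000 : Int), "Financial Freedom Fighter: On your way to independence!"),
   ((2000 : Int), "Wealth Architect: Building a solid financial future!"),
   ((1500 : Int), "Money Guru: Teaching others about financial wisdom!"),
   ((1000 : Int), "Financial Wizard: Managing your money like a pro!"),
   ((750 : Int), "Investment Beginner: Made your first investment plan!"),
   ((500 : Int), "Savings Hero: Building your financial cushion!"),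
   ((300 : Int), "Expense Tracker: Consistently tracking your spending!"),
   ((200 : Int), "Budget Master: Created your first budget plan!"),
   ((100 : Int), "Financial Novice: Started your financial journey!")]

-- the recursive `pick(remaining)` of Source B: first tier whose threshold is met
def pvPick (points : Int) : List (Int × String) → Option String
  | [] => none
  | (threshold, text) :: rest =>
      if points ≥ threshold then some text else pvPick points rest

def get_achievement_alt (points : Int) : Option String :=
  pvPick points pvTiersDesc

-- ===== PRECONDITION & SPEC =====
def Spec_get_achievement (points : Int) (out : Option String) : Prop := out = get_achievement_alt points
instance (points : Int) (out : Option String) : Decidable (Spec_get_achievement points out) := by unfold Spec_get_achievement; infer_instance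

-- ===== CLAIM =====
def Claim_equal_get_achievement : Prop := ∀ (points : Int), Dom_get_achievement points → Spec_get_achievement points (get_achievement points)

-- ===== LEMMAS AND PROOFS =====

theorem pvSortedItems : PySem.List.sorted pvAchievements.items Prod.fst = pvAchievements.items :=
  PySem.List.sorted_eq_of_perm_of_pairwise_lt _ _ _ (List.Perm.refl _) (by decide)

-- A's ascending overwrite fold and B's descending first-match recursion both
-- unfold to the same nested conditional (the last overwrite = the first match)
theorem pvAB (p : Int) : get_achievement p = get_achievement_alt p := by
  unfold get_achievement get_achievement_alt
  rw [pvSortedItems]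
  simp only [show pvAchievements.items = [((100 : Int), "Financial Novice: Started your financial journey!"), ((200 : Int), "Budget Master: Created your first budget plan!"), ((300 : Int), "Expense Tracker: Consistently tracking your spending!"), ((500 : Int), "Savings Hero: Building your financial cushion!"), ((750 : Int), "Investment Beginner: Made your first investment plan!"), ((1000 : Int), "Financial Wizard: Managing your money like a pro!"), ((1500 : Int), "Money Guru: Teaching others about financial wisdom!"), ((2000 : Int), "Wealth Architect: Building a solid financial future!"), ((3000 : Int), "Financial Freedom Fighter: On your way to independence!"), ((5000 : Int), "FinSmart Legend: Achieved legendary financial status!")] from rfl,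
    List.foldl, pvTiersDesc, pvPick]

-- ===== VERDICT =====
theorem get_achievement_spec : Claim_equal_get_achievement := by
  intro p _
  unfold Spec_get_achievement
  exact pvAB p
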